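-- pv_equiv track=rewrite | github.com/mcoski8/tw | scripts/extract_pilot_ranked.py | rank_summary
-- ===== SOURCE A (Python) =====
-- RANK_CHARS = '23456789TJQKA'  # index 0..12 → rank 2..14
--
-- def rank_summary(hand7: tuple) -> str:
--     """Describe the hand's rank structure (e.g. 'quads + trips')."""
--     rank_counts = {}
--     for c in hand7:
--         r = (c // 4) + 2
--         rank_counts[r] = rank_counts.get(r, 0) + 1
--     multiplicities = sorted(rank_counts.values(), reverse=True)
--     parts = []
--     if multiplicities[0] == 4:
--         parts.append("quads")
--         multiplicities = multiplicities[1:]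
--     elif multiplicities[0] == 3:
--         parts.append("trips")
--         multiplicities = multiplicities[1:]
--     pairs = sum(1 for m in multiplicities if m == 2)
--     if pairs:
--         parts.append(f"{pairs} pair{'s' if pairs > 1 else ''}")
--     singletons = sum(1 for m in multiplicities if m == 1)
--     if singletons:
--         parts.append(f"{singletons} singleton{'s' if singletons > 1 else ''}")
--     high = max((c // 4) + 2 for c in hand7)
--     parts.append(f"high={RANK_CHARS[high - 2]}")
--     return ', '.join(parts)
-- ===== SOURCE B (Python) =====
-- RANK_CHARS = '23456789TJQKA'  # index 0..12 -> rank 2..14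
--
-- def rank_summary(hand7: tuple) -> str:
--     """Describe the hand's rank structure (e.g. 'quads + trips')."""
--     # Peel algorithm: no dict and no sort.  Repeatedly take the first card's
--     # rank, count its occurrences, strip that whole rank group out, and fold
--     # the group size into the running top/pairs/singletons tallies.
--     ranks = [(c // 4) + 2 for c in hand7]
--     top = 0
--     pairs = 0
--     singles = 0
--     rest = ranks
--     while rest:
--         r = rest[0]
--         m = rest.count(r)
--         if m > top:
--             top = m
--         if m == 2:
--             pairs += 1
--         elif m == 1:
--             singles += 1
--         rest = [x for x in rest if x != r]
--     parts = []
--     if top == 4: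
--         parts.append("quads")
--     elif top == 3:
--         parts.append("trips")
--     if pairs:
--         parts.append(f"{pairs} pair{'s' if pairs > 1 else ''}")
--     if singles:
--         parts.append(f"{singles} singleton{'s' if singles > 1 else ''}")
--     parts.append(f"high={RANK_CHARS[max(ranks) - 2]}")
--     return ', '.join(parts)
-- ===== Notes on version B (the rewrite author's own statement) =====
-- stated objective: alternative
-- what changed: B drops A's rank-count dict and reverse-sorted multiplicity list entirely: it peels the rank groups off the list one by one (count the first element's rank, filter that rank out, repeat), folding each group size into running top/pairs/singletons accumulators in a single pass per group, then formats the same parts.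
import Mathlib
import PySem

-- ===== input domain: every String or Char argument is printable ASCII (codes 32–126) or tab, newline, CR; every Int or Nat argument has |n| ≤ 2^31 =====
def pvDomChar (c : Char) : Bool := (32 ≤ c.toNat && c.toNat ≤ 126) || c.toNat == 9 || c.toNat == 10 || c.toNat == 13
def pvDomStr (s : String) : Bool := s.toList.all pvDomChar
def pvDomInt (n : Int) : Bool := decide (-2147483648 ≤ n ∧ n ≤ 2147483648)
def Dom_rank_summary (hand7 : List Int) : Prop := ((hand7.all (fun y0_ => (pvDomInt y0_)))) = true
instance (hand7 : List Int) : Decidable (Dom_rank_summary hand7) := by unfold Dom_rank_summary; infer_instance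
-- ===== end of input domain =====

-- B replaces A's dict-of-rank-counts + reverse-sorted multiplicity list by a peel loop:
-- repeatedly count the first remaining rank, filter that rank group out, and fold the group
-- size into running top/pairs/singletons accumulators; objective: alternative.

-- ===== PORT A =====
def pvRankChars : String := "23456789TJQKA"

def rank_summary (hand7 : List Int) : String :=
  let rank_counts := hand7.foldl
    (fun d c => d.insert (PySem.Int.floordiv c 4 + 2) (d.getD (PySem.Int.floordiv c 4 + 2) 0 + 1))
    (PySem.Dict.empty : PySem.Dict Int Int)
  let multiplicities := PySem.List.sorted rank_counts.values (fun m => m) true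
  match PySem.List.pyGet? multiplicities 0 with
  | none => ""  -- IndexError on an empty hand (excluded by Pre_)
  | some m0 =>
    let (parts, multiplicities) :=
      if m0 = 4 then (["quads"], PySem.List.slice multiplicities (some 1) none)
      else if m0 = 3 then (["trips"], PySem.List.slice multiplicities (some 1) none)
      else (([] : List String), multiplicities)
    let pairs : Int := multiplicities.foldl (fun acc m => if m == 2 then acc + 1 else acc) 0
    let parts := if pairs ≠ 0 then
        parts ++ [PySem.Int.toStr pairs ++ " pair" ++ (if pairs > 1 then "s" else "")]
      else parts
    let singletons : Int := multiplicities.foldl (fun acc m => if m == 1 then acc + 1 else acc) 0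
    let parts := if singletons ≠ 0 then
        parts ++ [PySem.Int.toStr singletons ++ " singleton" ++ (if singletons > 1 then "s" else "")]
      else parts
    match PySem.List.max? (hand7.map (fun c => PySem.Int.floordiv c 4 + 2)) (fun r => r) with
    | none => ""  -- ValueError on an empty hand (excluded by Pre_)
    | some high =>
      match PySem.Str.pyGet? pvRankChars (high - 2) with
      | none => ""  -- IndexError: rank char index out of range (excluded by Pre_)
      | some ch => PySem.Str.join ", " (parts ++ ["high=" ++ String.ofList [ch]])

-- ===== PORT B =====
-- B's while loop: peel off one whole rank group per step and update the three tallies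
def pvPeel : List Int → Int × Int × Int → Int × Int × Int
  | [], acc => acc
  | r :: t, (top, pairs, singles) =>
    let m : Int := (PySem.List.count (r :: t) r : Int)
    -- 'elif m == 1' ported as a plain if: m = 2 and m = 1 are mutually exclusive
    pvPeel ((r :: t).filter (fun x => !(x == r)))
      (if m > top then m else top,
       if m = 2 then pairs + 1 else pairs,
       if m = 1 then singles + 1 else singles)
termination_by l => l.length
decreasing_by
  simp only [List.filter_cons, beq_self_eq_true, Bool.not_true, List.length_cons]
  exact Nat.lt_succ_of_le (List.length_filter_le _ t)

def rank_summary_alt (hand7 : List Int) : String :=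
  let ranks := hand7.map (fun c => PySem.Int.floordiv c 4 + 2)
  let (top, pairs, singles) := pvPeel ranks (0, 0, 0)
  let parts : List String :=
    if top = 4 then ["quads"] else if top = 3 then ["trips"] else []
  let parts := if pairs ≠ 0 then
      parts ++ [PySem.Int.toStr pairs ++ " pair" ++ (if pairs > 1 then "s" else "")]
    else parts
  let parts := if singles ≠ 0 then
      parts ++ [PySem.Int.toStr singles ++ " singleton" ++ (if singles > 1 then "s" else "")]
    else parts
  match PySem.List.max? ranks (fun r => r) with
  | none => ""  -- ValueError on an empty hand (excluded by Pre_)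
  | some high =>
    match PySem.Str.pyGet? pvRankChars (high - 2) with
    | none => ""  -- IndexError: rank char index out of range (excluded by Pre_)
    | some ch => PySem.Str.join ", " (parts ++ ["high=" ++ String.ofList [ch]])

-- ===== PRECONDITION & SPEC =====
-- Pre_ excludes exactly the inputs where A raises: the empty hand (IndexError on the first
-- multiplicity) and hands whose maximum rank puts the rank-character lookup outside
-- Python's (negative-wrapping) index range of RANK_CHARS.
def Pre_rank_summary (hand7 : List Int) : Prop :=
  hand7 ≠ [] ∧ (∀ c ∈ hand7, c ≤ 51) ∧ (∃ c ∈ hand7, -52 ≤ c)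
instance (hand7 : List Int) : Decidable (Pre_rank_summary hand7) := by
  unfold Pre_rank_summary; infer_instance

def pvWitness_rank_summary : List Int := [0, 1, 2, 3, 17, 21, 50]

def Spec_rank_summary (hand7 : List Int) (out : String) : Prop := out = rank_summary_alt hand7
instance (hand7 : List Int) (out : String) : Decidable (Spec_rank_summary hand7 out) := by
  unfold Spec_rank_summary; infer_instance

-- ===== CLAIM (what is proved, stated in full; the proofs are below) =====
def Claim_equal_rank_summary : Prop := ∀ (hand7 : List Int), Dom_rank_summary hand7 →
  Pre_rank_summary hand7 → Spec_rank_summary hand7 (rank_summary hand7)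

-- ===== LEMMAS AND PROOFS =====

-- removing one value commutes with ordered dedup
theorem pv_ofList_filter (l : List Int) (r : Int) :
    (PySem.Set.ofList l).filter (fun y => !(y == r))
      = PySem.Set.ofList (l.filter (fun y => !(y == r))) := by
  induction l with
  | nil => rfl
  | cons x t ih =>
    by_cases hxr : x = r
    · subst hxr
      rw [PySem.Set.ofList_cons]
      simp only [PySem.Set.discard]
      rw [List.filter_cons, if_neg (by simp), List.filter_cons, if_neg (by simp),
        List.filter_filter]
      rw [← ih]
      exact List.filter_congr (fun y _ => Bool.and_self _)
    · have hfr : (x :: t).filter (fun y => !(y == r)) = x :: t.filter (fun y => !(y == r)) := by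
        rw [List.filter_cons, if_pos (by simp [hxr])]
      rw [hfr, PySem.Set.ofList_cons, PySem.Set.ofList_cons]
      simp only [PySem.Set.discard]
      rw [← ih, List.filter_cons, if_pos (by simp [hxr]),
        List.filter_filter, List.filter_filter]
      exact congrArg _ (List.filter_congr (fun y _ => Bool.and_comm _ _))

-- the multiset of group sizes, in peel order
def pvCnts (rs : List Int) : List Int :=
  (PySem.Set.ofList rs).map (fun v => (rs.count v : Int))

theorem pv_cnts_cons (r : Int) (t : List Int) :
    pvCnts (r :: t) = ((r :: t).count r : Int)
      :: pvCnts ((r :: t).filter (fun x => !(x == r))) := by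
  unfold pvCnts
  rw [PySem.Set.ofList_cons]
  simp only [PySem.Set.discard]
  rw [pv_ofList_filter, List.map_cons]
  have hfil : (r :: t).filter (fun x => !(x == r)) = t.filter (fun x => !(x == r)) := by
    rw [List.filter_cons, if_neg (by simp)]
  rw [hfil]
  refine congrArg _ (List.map_congr_left ?_)
  intro v hv
  have hvne : ¬ (v == r) = true := by
    have := (PySem.Set.mem_ofList _ v).mp hv
    have := List.of_mem_filter this
    simpa using this
  have h1 : (t.filter (fun x => !(x == r))).count v = t.count v :=
    List.count_filter (by simpa using hvne)
  have hrv : ¬ r = v := fun h => hvne (by simp [h])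
  have h2 : (r :: t).count v = t.count v := by
    rw [List.count_cons]; simp [hrv]
  rw [h2, h1]

-- the peel loop computes running max / pair count / singleton count of the group sizes
theorem pvPeel_spec_aux (n : Nat) : ∀ (rs : List Int), rs.length ≤ n → ∀ (a b c : Int),
    pvPeel rs (a, b, c) =
      ((pvCnts rs).foldl max a,
       b + ((pvCnts rs).count 2 : Int),
       c + ((pvCnts rs).count 1 : Int)) := by
  induction n with
  | zero =>
    intro rs hrs a b c
    rw [List.length_eq_zero_iff.mp (Nat.le_zero.mp hrs), pvPeel]
    simp [pvCnts]
  | succ n ih =>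
    intro rs hrs a b c
    match rs with
    | [] => rw [pvPeel]; simp [pvCnts]
    | r :: t =>
      have hlen : ((r :: t).filter (fun x => !(x == r))).length ≤ n := by
        have h1 : ((r :: t).filter (fun x => !(x == r))).length ≤ t.length := by
          rw [List.filter_cons, if_neg (by simp)]
          exact List.length_filter_le _ t
        simp only [List.length_cons] at hrs
        omega
      rw [pvPeel]
      simp only [PySem.List.count_eq]
      rw [ih _ hlen, pv_cnts_cons]
      refine Prod.ext ?_ (Prod.ext ?_ ?_)
      · simp only [List.foldl_cons]
        congr 1
        split_ifs with h
        · exact (max_eq_right h.le).symm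
        · exact (max_eq_left (not_lt.mp h)).symm
      · simp only [List.count_cons, beq_iff_eq]
        push_cast
        split_ifs <;> omega
      · simp only [List.count_cons, beq_iff_eq]
        push_cast
        split_ifs <;> omega

theorem pvPeel_spec (rs : List Int) (a b c : Int) :
    pvPeel rs (a, b, c) =
      ((pvCnts rs).foldl max a,
       b + ((pvCnts rs).count 2 : Int),
       c + ((pvCnts rs).count 1 : Int)) :=
  pvPeel_spec_aux rs.length rs le_rfl a b c

-- A's counting loop produces exactly the group sizes pvCnts (as a dict's values)
theorem pv_values_eq (hand7 : List Int) :
    (hand7.foldl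
      (fun d c => d.insert (PySem.Int.floordiv c 4 + 2) (d.getD (PySem.Int.floordiv c 4 + 2) 0 + 1))
      (PySem.Dict.empty : PySem.Dict Int Int)).values
    = pvCnts (hand7.map (fun c => PySem.Int.floordiv c 4 + 2)) := by
  rw [show (hand7.foldl
      (fun d c => d.insert (PySem.Int.floordiv c 4 + 2) (d.getD (PySem.Int.floordiv c 4 + 2) 0 + 1))
      (PySem.Dict.empty : PySem.Dict Int Int))
    = ((hand7.map (fun c => PySem.Int.floordiv c 4 + 2)).foldl
      (fun (d : PySem.Dict Int Int) x => d.insert x (d.getD x 0 + 1)) PySem.Dict.empty) from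
    by rw [List.foldl_map]]
  rw [PySem.Dict.foldl_insert_getD_add_one_eq_counter]
  generalize hand7.map (fun c => PySem.Int.floordiv c 4 + 2) = rs
  rw [PySem.Dict.values_eq_map_keys _ (PySem.Dict.nodup_keys_counter rs) 0,
    PySem.Dict.keys_counter]
  exact List.map_congr_left (fun v _ => PySem.Dict.getD_counter rs v)

-- the head of the reverse-sorted list is the (first) maximum
theorem pv_head_sorted_rev_eq_max (vals : List Int) (m0 : Int) (t : List Int)
    (hms : PySem.List.sorted vals (fun x => x) true = m0 :: t) :
    PySem.List.max? vals (fun x => x) = some m0 := by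
  rcases e : PySem.List.max? vals (fun x => x) with _ | m
  · have hv : vals = [] := (PySem.List.max?_eq_none_iff vals _).mp e
    rw [hv, (PySem.List.sorted_eq_nil_iff ([] : List Int) _ true).mpr rfl] at hms
    exact absurd hms.symm (List.cons_ne_nil m0 t)
  · have hm0mem : m0 ∈ vals := by
      have : m0 ∈ PySem.List.sorted vals (fun x => x) true := by rw [hms]; exact List.mem_cons_self
      exact (PySem.List.mem_sorted vals _ true m0).mp this
    have h1 : m ≤ m0 := PySem.List.key_head_sorted_rev_ge vals (fun x => x) hms m (PySem.List.max?_mem e)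
    have h2 : m0 ≤ m := PySem.List.max?_isMax e m0 hm0mem
    simp [le_antisymm h2 h1]

theorem rank_summary_eq (hand7 : List Int) (h7 : hand7 ≠ []) :
    rank_summary hand7 = rank_summary_alt hand7 := by
  have hrsne : hand7.map (fun c => PySem.Int.floordiv c 4 + 2) ≠ [] := by
    simpa using h7
  unfold rank_summary rank_summary_alt
  simp only []
  rw [pv_values_eq, pvPeel_spec]
  generalize hand7.map (fun c => PySem.Int.floordiv c 4 + 2) = rs at hrsne ⊢
  have hvne : pvCnts rs ≠ [] := by
    rcases List.exists_cons_of_ne_nil hrsne with ⟨r, rt, hr⟩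
    have hrmem : r ∈ PySem.Set.ofList rs := (PySem.Set.mem_ofList rs r).mpr
      (by rw [hr]; exact List.mem_cons_self)
    unfold pvCnts
    simp only [ne_eq, List.map_eq_nil_iff]
    exact List.ne_nil_of_mem hrmem
  have hpos : ∀ v ∈ pvCnts rs, 1 ≤ v := by
    intro v hv
    rcases List.mem_map.mp hv with ⟨x, hx, rfl⟩
    have hxm : x ∈ rs := (PySem.Set.mem_ofList rs x).mp hx
    have : 0 < rs.count x := List.count_pos_iff.mpr hxm
    exact_mod_cast this
  have hsne : PySem.List.sorted (pvCnts rs) (fun m => m) true ≠ [] := by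
    simpa [PySem.List.sorted_eq_nil_iff] using hvne
  rcases List.exists_cons_of_ne_nil hsne with ⟨m0, t', hms⟩
  have hmax : PySem.List.max? (pvCnts rs) (fun x => x) = some m0 :=
    pv_head_sorted_rev_eq_max _ m0 t' hms
  rcases List.exists_cons_of_ne_nil hvne with ⟨v0, vt, hv⟩
  have hfold : (pvCnts rs).foldl max 0 = m0 := by
    rw [hv, List.foldl_cons,
      max_eq_right (le_trans zero_le_one (hpos v0 (hv ▸ List.mem_cons_self)))]
    rw [hv, PySem.List.max?_id_cons] at hmax
    exact Option.some.inj hmax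
  have hcount : ∀ v : Int, List.count v (m0 :: t') = List.count v (pvCnts rs) := fun v =>
    (hms ▸ PySem.List.sorted_perm (pvCnts rs) (fun m => m) true).count_eq v
  have hslice : PySem.List.slice (m0 :: t') (some 1) none = t' := by
    rw [PySem.List.slice_from _ (by omega)]; simp
  simp only [hms, PySem.List.pyGet?_zero_cons, hfold, hslice,
    PySem.List.foldl_beq_add_one, zero_add]
  by_cases h4 : m0 = 4
  · have c2 : List.count 2 t' = List.count 2 (pvCnts rs) := by
      have h := hcount 2; rw [List.count_cons] at h; simpa [h4] using h
    have c1 : List.count 1 t' = List.count 1 (pvCnts rs) := by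
      have h := hcount 1; rw [List.count_cons] at h; simpa [h4] using h
    simp only [if_pos h4, c2, c1]
  · by_cases h3 : m0 = 3
    · have c2 : List.count 2 t' = List.count 2 (pvCnts rs) := by
        have h := hcount 2; rw [List.count_cons] at h; simpa [h3] using h
      have c1 : List.count 1 t' = List.count 1 (pvCnts rs) := by
        have h := hcount 1; rw [List.count_cons] at h; simpa [h3] using h
      simp only [if_neg h4, if_pos h3, c2, c1]
    · simp only [if_neg h4, if_neg h3, hcount 2, hcount 1]

-- ===== VERDICT (by name: the statement is the Claim_ definition above) =====
theorem rank_summary_spec : Claim_equal_rank_summary := by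
  intro hand7 _ hpre
  unfold Spec_rank_summary
  exact rank_summary_eq hand7 hpre.1
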